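/- GENERATED by tools/mkcompositions.py from design/units.gif.tsv (unit `DGifDecompressLine.COMPOSITION`) — do not edit.
   THE PROOF of the composition unit `DGifDecompressLine.COMPOSITION`: the 17 segments of `DGifDecompressLine` chain into its contract, by the theorem
   `Gif.Spec.DGifDecompressLine.compose` (proved next to the cut assertions). -/
import Gif.Spec.Units.DGifDecompressLine_COMPOSITION

/-- The segments of `DGifDecompressLine` compose into its contract. -/
theorem Gif.Spec.Proved.DGifDecompressLine_COMPOSITION_ok : Gif.Spec.DGifDecompressLine_COMPOSITION.Statement := by
  intro Lay _hLay μ _hμ u₀ h_DGifDecompressLine_P h_DGifDecompressLine_1 h_DGifDecompressLine_2 h_DGifDecompressLine_3 h_DGifDecompressLine_4 h_DGifDecompressLine_5 h_DGifDecompressLine_6 h_DGifDecompressLine_7 h_DGifDecompressLine_8 h_DGifDecompressLine_9 h_DGifDecompressLine_10 h_DGifDecompressLine_11 h_DGifDecompressLine_12 h_DGifDecompressLine_13 h_DGifDecompressLine_14 h_DGifDecompressLine_15 h_DGifDecompressLine_E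
  apply Gif.Spec.DGifDecompressLine.compose
  all_goals assumption
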